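-- pv_equiv track=rewrite | github.com/Mika383/supervison | src/supervision/detection/utils/converters.py | _decode_coco_rle_string
-- ===== SOURCE A (Python) =====
-- def _decode_coco_rle_string(s: str) -> list[int]:
--     """Decode a COCO compressed RLE counts string to a list of run-length integers.
--
--     Implements the decoding algorithm from the COCO API (pycocotools) for
--     compressed RLE strings. Each character encodes 5 data bits in a base-48
--     scheme with continuation and sign flags, using delta encoding for indices
--     beyond the first two.
--
--     Args:
--         s: The compressed RLE counts string.
--
--     Returns:
--         A list of run-length integers (alternating background/foreground counts).
--     """
--     counts: list[int] = []
--     i = 0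
--     while i < len(s):
--         x = 0
--         k = 0
--         more = True
--         while more:
--             if i >= len(s):
--                 raise ValueError(
--                     f"Malformed compressed RLE string: unexpected end at position {i}"
--                 )
--             c = ord(s[i]) - 48
--             x |= (c & 0x1F) << (5 * k)
--             more = bool(c & 0x20)
--             i += 1
--             k += 1
--             if not more and (c & 0x10):
--                 x |= ~0 << (5 * k)
--         if len(counts) > 2:
--             x += counts[-2]
--         counts.append(x)
--     return counts
-- ===== SOURCE B (Python) =====
-- def _decode_coco_rle_string(s: str) -> list[int]:
--     """Decode a COCO compressed RLE counts string (two-pass: parse varints, then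
--     reconstruct deltas in place)."""
--     raw: list[int] = []
--     i, n = 0, len(s)
--     while i < n:
--         # find the end of the current base-48 varint group
--         j = i
--         while (ord(s[j]) - 48) & 0x20:
--             j += 1
--             if j >= n:
--                 raise ValueError(
--                     f"Malformed compressed RLE string: unexpected end at position {j}"
--                 )
--         # combine the 5-bit digits back-to-front (Horner), then sign-extend
--         x = 0
--         for p in range(j, i - 1, -1):
--             x = x * 32 + ((ord(s[p]) - 48) & 0x1F)
--         if (ord(s[j]) - 48) & 0x10:
--             x -= 32 ** (j + 1 - i)
--         raw.append(x)
--         i = j + 1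
--     for t in range(3, len(raw)):
--         raw[t] += raw[t - 2]
--     return raw
-- ===== Notes on version B (the rewrite author's own statement) =====
-- stated objective: alternative
-- what changed: A's single fused loop (bitwise or/shift varint accumulation with the delta applied inline) is split into two passes: first parse every base-48 varint group and combine its 5-bit digits back-to-front by Horner's rule with an arithmetic sign-extension subtraction, then reconstruct the deltas in a second in-place index pass raw[t] += raw[t-2].
-- outside the precondition, e.g. on _decode_coco_rle_string('unexpected end'): A raises ValueError, B raises ValueError
import Mathlib
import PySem

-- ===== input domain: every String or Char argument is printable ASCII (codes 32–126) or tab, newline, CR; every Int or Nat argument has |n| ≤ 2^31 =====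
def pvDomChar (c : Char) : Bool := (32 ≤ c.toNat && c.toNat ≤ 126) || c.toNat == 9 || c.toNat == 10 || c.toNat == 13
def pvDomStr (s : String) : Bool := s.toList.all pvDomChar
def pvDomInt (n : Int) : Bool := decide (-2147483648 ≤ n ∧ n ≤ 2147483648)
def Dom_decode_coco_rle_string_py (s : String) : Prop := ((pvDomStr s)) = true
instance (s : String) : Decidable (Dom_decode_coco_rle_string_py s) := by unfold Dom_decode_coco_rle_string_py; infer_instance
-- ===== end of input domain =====

-- B re-implements the fused decode loop as two passes — parse all base-48 varints, then apply
-- the delta reconstruction in a second index pass — with the varint value combined back-to-front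
-- by Horner's rule instead of bitwise or/shift accumulation (objective: alternative decomposition).

-- ===== PORT A =====
-- inner 'while more' loop of A: reads chars, accumulates x by or-ing 5-bit chunks; none = ValueError
def pvA_varint : List Char → Int → Nat → Option (Int × List Char)
  | [], _, _ => none
  | ch :: rest, x, k =>
    let c : Int := (ch.toNat : Int) - 48
    let x' := PySem.Int.bor x (PySem.Int.band c 31 <<< (5 * k))
    if PySem.Int.band c 32 ≠ 0 then
      pvA_varint rest x' (k + 1)
    else if PySem.Int.band c 16 ≠ 0 then
      some (PySem.Int.bor x' (((-1) : Int) <<< (5 * (k + 1))), rest)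
    else
      some (x', rest)

-- the port's outer loop needs this to terminate: the inner loop consumes at least one char
theorem pvA_varint_len : ∀ (cs : List Char) (x : Int) (k : Nat) (y : Int) (r : List Char),
    pvA_varint cs x k = some (y, r) → r.length < cs.length := by
  intro cs
  induction cs with
  | nil => intro x k y r h; simp [pvA_varint] at h
  | cons ch rest ih =>
    intro x k y r h
    simp only [pvA_varint] at h
    split at h
    · exact Nat.lt_succ_of_lt (ih _ _ _ _ h)
    · split at h <;>
        · simp only [Option.some.injEq, Prod.mk.injEq] at h
          obtain ⟨-, rfl⟩ := h
          simp

def pvA_loop : List Char → List Int → Option (List Int)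
  | [], counts => some counts
  | ch :: rest, counts =>
    match h : pvA_varint (ch :: rest) 0 0 with
    | none => none
    | some (x, rest') =>
      let x' := if counts.length > 2 then x + PySem.List.pyGetD counts (-2) 0 else x
      pvA_loop rest' (counts ++ [x'])
  termination_by cs _ => cs.length
  decreasing_by exact pvA_varint_len _ _ _ _ _ h

def decode_coco_rle_string_py (s : String) : List Int :=
  (pvA_loop s.toList []).getD []

-- ===== PORT B =====
-- B's inner scan: the chars of the current varint group (continuation chars + terminator); none = ValueError
def pvB_group : List Char → Option (List Char × List Char)
  | [] => none
  | ch :: rest =>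
    if PySem.Int.band ((ch.toNat : Int) - 48) 32 ≠ 0 then
      match pvB_group rest with
      | none => none
      | some (g, r) => some (ch :: g, r)
    else some ([ch], rest)

theorem pvB_group_len : ∀ (cs : List Char) (g r : List Char),
    pvB_group cs = some (g, r) → r.length < cs.length := by
  intro cs
  induction cs with
  | nil => intro g r h; simp [pvB_group] at h
  | cons ch rest ih =>
    intro g r h
    simp only [pvB_group] at h
    split at h
    · cases hg : pvB_group rest with
      | none => rw [hg] at h; simp at h
      | some p =>
        obtain ⟨g', r'⟩ := p
        rw [hg] at h
        simp only [Option.some.injEq, Prod.mk.injEq] at h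
        obtain ⟨-, rfl⟩ := h
        exact Nat.lt_succ_of_lt (ih g' _ hg)
    · simp only [Option.some.injEq, Prod.mk.injEq] at h
      obtain ⟨-, rfl⟩ := h
      simp

-- B's first pass: decode every varint (Horner back-to-front + sign extension), no delta applied
def pvB_parse : List Char → Option (List Int)
  | [] => some []
  | ch :: rest =>
    match h : pvB_group (ch :: rest) with
    | none => none
    | some (g, r) =>
      let u := (g.reverse).foldl (fun a ch' => a * 32 + PySem.Int.band ((ch'.toNat : Int) - 48) 31) 0
      let x := if PySem.Int.band (((g.getLastD '0').toNat : Int) - 48) 16 ≠ 0 then u - 32 ^ g.length else u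
      match pvB_parse r with
      | none => none
      | some xs => some (x :: xs)
  termination_by cs => cs.length
  decreasing_by exact pvB_group_len _ _ _ h

-- B's second pass: raw[t] += raw[t-2] for t ≥ 3, reading already-reconstructed values
def pvB_recon : Int → Int → List Int → List Int
  | _, _, [] => []
  | a, b, x :: xs => (x + a) :: pvB_recon b (x + a) xs

def decode_coco_rle_string_py_alt (s : String) : List Int :=
  match pvB_parse s.toList with
  | none => []
  | some (r0 :: r1 :: r2 :: rest) => r0 :: r1 :: r2 :: pvB_recon r1 r2 rest
  | some raw => raw

-- ===== PRECONDITION & SPEC =====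
-- Pre_ excludes exactly the strings whose final character still has the base-48 continuation
-- bit set (including chars below '0', whose negative code keeps the bit set): there Python A
-- raises ValueError ("unexpected end"), and B raises the same ValueError.
def Pre_decode_coco_rle_string_py (s : String) : Prop :=
  PySem.Int.band (((s.toList.getLastD '0').toNat : Int) - 48) 32 = 0
instance (s : String) : Decidable (Pre_decode_coco_rle_string_py s) := by
  unfold Pre_decode_coco_rle_string_py; infer_instance

def pvWitness_decode_coco_rle_string_py : String := "31"

def Spec_decode_coco_rle_string_py (s : String) (out : List Int) : Prop :=
  out = decode_coco_rle_string_py_alt s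
instance (s : String) (out : List Int) : Decidable (Spec_decode_coco_rle_string_py s out) := by
  unfold Spec_decode_coco_rle_string_py; infer_instance

-- ===== CLAIM (what is proved, stated in full; the proofs are below) =====
def Claim_equal_decode_coco_rle_string_py : Prop :=
  ∀ (s : String), Dom_decode_coco_rle_string_py s → Pre_decode_coco_rle_string_py s →
    Spec_decode_coco_rle_string_py s (decode_coco_rle_string_py s)

-- ===== LEMMAS AND PROOFS =====

-- disjoint-bit or is addition (Nat)
theorem pv_nat_lor_add (x d n : Nat) (h : x < 2 ^ n) : x ||| (d <<< n) = x + d * 2 ^ n := by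
  apply Nat.eq_of_testBit_eq
  intro j
  rw [Nat.testBit_lor, Nat.testBit_shiftLeft]
  have hrw : x + d * 2 ^ n = 2 ^ n * d + x := by ring
  rw [hrw, Nat.testBit_two_pow_mul_add d h j]
  by_cases hj : j < n
  · simp [hj, Nat.not_le.mpr hj]
  · have hx : x.testBit j = false :=
      Nat.testBit_lt_two_pow (lt_of_lt_of_le h (Nat.pow_le_pow_right (by norm_num) (Nat.not_lt.mp hj)))
    simp [hx, Nat.not_lt.mp hj, hj]

-- disjoint-bit or is addition (Int, nonneg operands)
theorem pv_int_bor_add (x d : Int) (n : Nat) (hx0 : 0 ≤ x) (hx : x < 2 ^ n) (hd : 0 ≤ d) :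
    PySem.Int.bor x (d <<< n) = x + d * 2 ^ n := by
  obtain ⟨a, rfl⟩ : ∃ a : Nat, x = a := ⟨x.toNat, (Int.toNat_of_nonneg hx0).symm⟩
  obtain ⟨b, rfl⟩ : ∃ b : Nat, d = b := ⟨d.toNat, (Int.toNat_of_nonneg hd).symm⟩
  have hmul : ((b : Int)) <<< n = ((b <<< n : Nat) : Int) := by
    rw [Int.shiftLeft_eq, Nat.shiftLeft_eq]; push_cast; ring
  rw [hmul, PySem.Int.bor_natCast, pv_nat_lor_add a b n (by exact_mod_cast hx)]
  push_cast
  ring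

-- or with (-1 << n) sign-extends: subtracts 2^n from a value below 2^n
theorem pv_int_bor_signext (x : Int) (n : Nat) (hx0 : 0 ≤ x) (hx : x < 2 ^ n) :
    PySem.Int.bor x (((-1) : Int) <<< n) = x - 2 ^ n := by
  obtain ⟨m, rfl⟩ : ∃ m : Nat, x = m := ⟨x.toNat, (Int.toNat_of_nonneg hx0).symm⟩
  have hm : m < 2 ^ n := by exact_mod_cast hx
  have hpow : (0 : Int) < 2 ^ n := by positivity
  have hc : ((2 : Int) ^ n) = ((2 ^ n : Nat) : Int) := by push_cast; ring
  rw [Int.shiftLeft_eq, neg_one_mul]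
  unfold PySem.Int.bor
  rw [if_pos hx0, if_neg (by omega)]
  have h1 : (-(-((2 : Int) ^ n)) - 1).toNat = 2 ^ n - 1 := by rw [neg_neg, hc]; omega
  rw [h1]
  simp only [Int.toNat_natCast]
  rw [Nat.and_comm, Nat.and_two_pow_sub_one_eq_mod, Nat.mod_eq_of_lt hm, hc]
  omega

-- the 5-bit digit of a char is in [0, 32)
theorem pv_band31_bounds (c : Int) : 0 ≤ PySem.Int.band c 31 ∧ PySem.Int.band c 31 < 32 := by
  unfold PySem.Int.band
  split_ifs with h1 h2 h3
  · have := @Nat.and_le_right c.toNat (31:Int).toNat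
    simp only [show ((31:Int)).toNat = 31 from rfl] at this ⊢
    constructor
    · positivity
    · push_cast; omega
  · norm_num at h2
  · have := @Nat.and_le_right (31:Int).toNat (-c - 1).toNat
    simp only [show ((31:Int)).toNat = 31 from rfl] at this ⊢
    constructor
    · positivity
    · push_cast; omega
  · norm_num at h3

-- unsigned value of a varint group, least-significant char first
def pvUval : List Char → Int
  | [] => 0
  | ch :: t => PySem.Int.band ((ch.toNat : Int) - 48) 31 + 32 * pvUval t

-- B's back-to-front Horner fold computes pvUval
theorem pv_horner_eq_uval : ∀ (g : List Char) (a : Int),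
    (g.reverse).foldl (fun a ch' => a * 32 + PySem.Int.band ((ch'.toNat : Int) - 48) 31) a
      = a * 32 ^ g.length + pvUval g := by
  intro g
  induction g with
  | nil => intro a; simp [pvUval]
  | cons ch t ih =>
    intro a
    simp only [List.reverse_cons, List.foldl_append, List.foldl_cons, List.foldl_nil, ih,
      pvUval, List.length_cons, pow_succ]
    ring

-- signed value of a varint group
def pvSval (g : List Char) : Int :=
  if PySem.Int.band (((g.getLastD '0').toNat : Int) - 48) 16 ≠ 0 then pvUval g - 32 ^ g.length
  else pvUval g

theorem pvB_group_ne_nil : ∀ (cs g r : List Char), pvB_group cs = some (g, r) → g ≠ [] := by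
  intro cs
  induction cs with
  | nil => intro g r h; simp [pvB_group] at h
  | cons ch rest ih =>
    intro g r h
    simp only [pvB_group] at h
    split at h
    · cases hg : pvB_group rest with
      | none => rw [hg] at h; simp at h
      | some p =>
        obtain ⟨g', r'⟩ := p
        rw [hg] at h
        simp only [Option.some.injEq, Prod.mk.injEq] at h
        obtain ⟨rfl, -⟩ := h
        simp
    · simp only [Option.some.injEq, Prod.mk.injEq] at h
      obtain ⟨rfl, -⟩ := h
      simp

-- A's fused inner loop, started with accumulated value x on k chunks, equals B's
-- group scan followed by the signed group value
theorem pv_varint_eq : ∀ (cs : List Char) (x : Int) (k : Nat), 0 ≤ x → x < 32 ^ k →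
    pvA_varint cs x k = (pvB_group cs).map (fun p => (x + pvSval p.1 * 32 ^ k, p.2)) := by
  intro cs
  induction cs with
  | nil => intro x k _ _; simp [pvA_varint, pvB_group]
  | cons ch rest ih =>
    intro x k hx0 hx
    have h32 : ∀ m : Nat, (32:Int) ^ m = 2 ^ (5 * m) := by
      intro m; rw [show (32:Int) = 2 ^ 5 by norm_num, ← pow_mul]
    set c : Int := (ch.toNat : Int) - 48 with hc
    have hb := pv_band31_bounds c
    have hx' : PySem.Int.bor x (PySem.Int.band c 31 <<< (5 * k))
        = x + PySem.Int.band c 31 * 32 ^ k := by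
      rw [h32, pv_int_bor_add x _ (5 * k) hx0 (by rw [← h32]; exact hx) hb.1]
    simp only [pvA_varint, pvB_group, ← hc]
    by_cases hcont : PySem.Int.band c 32 ≠ 0
    · rw [if_pos hcont, if_pos hcont, hx']
      have hlt : x + PySem.Int.band c 31 * 32 ^ k < 32 ^ (k + 1) := by
        have : (32:Int) ^ (k+1) = 32 ^ k * 32 := pow_succ 32 k
        nlinarith [hb.1, hb.2, pow_pos (show (0:Int) < 32 by norm_num) k]
      rw [ih _ (k + 1) (by nlinarith [hb.1, pow_pos (show (0:Int) < 32 by norm_num) k]) hlt]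
      cases hg : pvB_group rest with
      | none => simp
      | some p =>
        cases p with
        | mk g r =>
          have hne := pvB_group_ne_nil rest g r hg
          simp only [Option.map_some]
          congr 1
          simp only [Prod.mk.injEq, and_true]
          have hlast : (ch :: g).getLastD '0' = g.getLastD '0' := by
            cases g with
            | nil => exact absurd rfl hne
            | cons a t => simp [List.getLastD]
          have hlen : (ch :: g).length = g.length + 1 := rfl
          simp only [pvSval, hlast, hlen, pvUval, ← hc]
          split
          · rw [pow_succ]; ring
          · rw [pow_succ]; ring
    · rw [if_neg hcont, if_neg hcont]
      simp only [Option.map_some]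
      have hlast : ([ch] : List Char).getLastD '0' = ch := rfl
      have huv : pvUval [ch] = PySem.Int.band c 31 := by simp [pvUval, ← hc]
      have hp32 : (0:Int) < 32 ^ k := pow_pos (by norm_num) k
      have hs : (32:Int) ^ (k + 1) = 32 ^ k * 32 := pow_succ 32 k
      by_cases hsign : PySem.Int.band c 16 ≠ 0
      · rw [if_pos hsign, hx']
        have hb0 : 0 ≤ x + PySem.Int.band c 31 * 32 ^ k := by nlinarith [hb.1]
        have hb1 : x + PySem.Int.band c 31 * 32 ^ k < 2 ^ (5 * (k + 1)) := by
          rw [← h32]; nlinarith [hb.1, hb.2]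
        rw [pv_int_bor_signext _ (5 * (k + 1)) hb0 hb1]
        simp only [Option.some.injEq, Prod.mk.injEq, and_true]
        simp only [pvSval, hlast, huv, ← hc, if_pos hsign, List.length_cons, List.length_nil]
        rw [← h32 (k + 1), hs]
        ring
      · rw [if_neg hsign, hx']
        simp only [Option.some.injEq, Prod.mk.injEq, and_true]
        simp only [pvSval, hlast, huv, ← hc, if_neg hsign]
        try ring

-- A's outer loop on an already-built prefix = B's parse pass followed by fused reconstruction
def pvFuse : List Int → List Int → List Int
  | counts, [] => counts
  | counts, x :: xs =>
    pvFuse (counts ++ [if counts.length > 2 then x + PySem.List.pyGetD counts (-2) 0 else x]) xs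

theorem pvA_loop_none (ch : Char) (rest : List Char) (counts : List Int)
    (h : pvA_varint (ch :: rest) 0 0 = none) : pvA_loop (ch :: rest) counts = none := by
  conv_lhs => rw [pvA_loop.eq_def]
  dsimp only
  split <;> simp_all

theorem pvA_loop_cons (ch : Char) (rest : List Char) (counts : List Int) (x : Int)
    (rest' : List Char) (h : pvA_varint (ch :: rest) 0 0 = some (x, rest')) :
    pvA_loop (ch :: rest) counts
      = pvA_loop rest' (counts ++
          [if counts.length > 2 then x + PySem.List.pyGetD counts (-2) 0 else x]) := by
  conv_lhs => rw [pvA_loop.eq_def]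
  dsimp only
  split
  · simp_all
  · rename_i p heq
    rw [h] at heq
    simp only [Option.some.injEq, Prod.mk.injEq] at heq
    obtain ⟨rfl, rfl⟩ := heq
    rfl

theorem pvB_parse_none (ch : Char) (rest : List Char)
    (h : pvB_group (ch :: rest) = none) : pvB_parse (ch :: rest) = none := by
  conv_lhs => rw [pvB_parse.eq_def]
  dsimp only
  split <;> simp_all

theorem pvB_parse_cons (ch : Char) (rest g r : List Char)
    (h : pvB_group (ch :: rest) = some (g, r)) :
    pvB_parse (ch :: rest) = (pvB_parse r).map (fun xs => pvSval g :: xs) := by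
  conv_lhs => rw [pvB_parse.eq_def]
  dsimp only
  split
  · simp_all
  · rename_i g2 r2 heq
    rw [h] at heq
    simp only [Option.some.injEq, Prod.mk.injEq] at heq
    obtain ⟨rfl, rfl⟩ := heq
    have hu : List.foldl (fun a ch' => a * 32 + PySem.Int.band ((ch'.toNat : Int) - 48) 31)
        0 g.reverse = pvUval g := by
      rw [pv_horner_eq_uval]; ring
    rw [hu]
    simp only [pvSval]
    cases pvB_parse r with
    | none => rfl
    | some xs => rfl

theorem pv_loop_eq : ∀ (cs : List Char) (counts : List Int),
    pvA_loop cs counts = (pvB_parse cs).map (pvFuse counts) := by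
  intro cs counts
  induction cs, counts using pvA_loop.induct with
  | case1 counts => simp [pvA_loop, pvB_parse, pvFuse]
  | case2 ch rest counts h =>
    have hv := pv_varint_eq (ch :: rest) 0 0 le_rfl (by norm_num)
    rw [h] at hv
    cases hg : pvB_group (ch :: rest) with
    | none => rw [pvA_loop_none ch rest counts h, pvB_parse_none ch rest hg]; rfl
    | some p => rw [hg] at hv; simp at hv
  | case3 ch rest counts x rest' h xprime ih =>
    have hv := pv_varint_eq (ch :: rest) 0 0 le_rfl (by norm_num)
    rw [h] at hv
    cases hg : pvB_group (ch :: rest) with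
    | none => rw [hg] at hv; simp at hv
    | some p =>
      obtain ⟨g, r⟩ := p
      rw [hg] at hv
      simp only [Option.map_some, Option.some.injEq, Prod.mk.injEq, pow_zero, mul_one,
        zero_add] at hv
      obtain ⟨rfl, rfl⟩ := hv
      rw [pvA_loop_cons ch rest counts _ _ h]
      have hx : (if counts.length > 2 then pvSval g + PySem.List.pyGetD counts (-2) 0
          else pvSval g) = xprime := rfl
      rw [hx, ih, pvB_parse_cons ch rest g rest' hg]
      cases pvB_parse rest' with
      | none => rfl
      | some xs => simp [pvFuse, hx]

-- B's match-headed second pass equals the fused pass started from the empty prefix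
theorem pv_fuse_big : ∀ (rest : List Int) (p : List Int) (a b : Int), p ≠ [] →
    pvFuse (p ++ [a, b]) rest = p ++ [a, b] ++ pvB_recon a b rest := by
  intro rest
  induction rest with
  | nil => intro p a b _; simp [pvFuse, pvB_recon]
  | cons x xs ih =>
    intro p a b hp
    have hlen : (p ++ [a, b]).length > 2 := by
      cases p with
      | nil => exact absurd rfl hp
      | cons _ _ => simp
    have hget : PySem.List.pyGetD (p ++ [a, b]) (-2) 0 = a := by
      rw [show ((-2:Int)) = -((2:Nat):Int) by norm_num,
        PySem.List.pyGetD_neg_natCast (p ++ [a, b]) 2 0 (by omega) (by simp)]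
      simp
    simp only [pvFuse, if_pos hlen, hget, pvB_recon]
    have hassoc : p ++ [a, b] ++ [x + a] = (p ++ [a]) ++ [b, x + a] := by simp
    rw [hassoc, ih (p ++ [a]) b (x + a) (by simp)]
    simp

theorem pv_fuse_nil : ∀ (raw : List Int),
    pvFuse [] raw = match raw with
      | r0 :: r1 :: r2 :: rest => r0 :: r1 :: r2 :: pvB_recon r1 r2 rest
      | l => l := by
  intro raw
  match raw with
  | [] => simp [pvFuse]
  | [r0] => simp [pvFuse]
  | [r0, r1] => simp [pvFuse]
  | r0 :: r1 :: r2 :: rest =>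
    show pvFuse [] (r0 :: r1 :: r2 :: rest) = r0 :: r1 :: r2 :: pvB_recon r1 r2 rest
    have hstep : pvFuse [] (r0 :: r1 :: r2 :: rest) = pvFuse ([r0] ++ [r1, r2]) rest := by
      simp [pvFuse]
    rw [hstep, pv_fuse_big rest [r0] r1 r2 (by simp)]
    simp

-- ===== VERDICT (by name: the statement is the Claim_ definition above) =====
theorem decode_coco_rle_string_py_spec : Claim_equal_decode_coco_rle_string_py := by
  intro s _ _
  unfold Spec_decode_coco_rle_string_py decode_coco_rle_string_py decode_coco_rle_string_py_alt
  rw [pv_loop_eq]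
  cases h : pvB_parse s.toList with
  | none => simp
  | some raw =>
    simp only [Option.map_some, Option.getD_some]
    rw [pv_fuse_nil]
    rcases raw with _ | ⟨r0, _ | ⟨r1, _ | ⟨r2, rest⟩⟩⟩ <;> rfl
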